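-- pv_equiv track=rewrite | github.com/Dima-Sh13/SilabeoPracticeVibeCoding | pi_language.py | obtener_grupos_vocalicos
-- ===== SOURCE A (Python) =====
-- VOCALES_ABIERTAS = ("a", "e", "o")
--
-- VOCALES_CERRADAS = ("i", "u")
--
-- def es_vocal(caracter: str) -> bool:
--     """
--     Devuelve True si `caracter` es una vocal (abierta o cerrada).
--
--     Asume que `caracter` es una cadena (normalmente de longitud 1).
--     """
--     return caracter in VOCALES_ABIERTAS or caracter in VOCALES_CERRADAS
--
-- def es_diptongo(grupo: str) -> bool:
--     """
--     Determina si los dos primeros caracteres de `grupo` forman un diptongo.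
--
--     Reglas consideradas:
--     - abierta + cerrada
--     - cerrada + abierta
--     - cerrada + cerrada
--
--     Asume que `grupo` tiene al menos 2 caracteres.
--     Devuelve True o False.
--     """
--     if grupo[0] in VOCALES_ABIERTAS and grupo[1] in VOCALES_CERRADAS:
--         return True
--     elif grupo[0] in VOCALES_CERRADAS and grupo[1] in VOCALES_ABIERTAS:
--         return True
--     elif grupo[0] in VOCALES_CERRADAS and grupo[1] in VOCALES_CERRADAS:
--         return True
--     return False
--
-- def es_triptongo(grupo: str) -> bool:
--     """
--     Comprueba si los tres primeros caracteres de `grupo` forman un triptongo.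
--
--     Patrón: cerrada, abierta, cerrada.
--     Asume que `grupo` tiene al menos 3 caracteres.
--     """
--     return grupo[0] in VOCALES_CERRADAS and grupo[1] in VOCALES_ABIERTAS and grupo[2] in VOCALES_CERRADAS
--
-- def es_grupo_vocalico_ok(grupo: str, caracter: str) -> bool:
--     """
--     Decide si `caracter` puede añadirse al `grupo` vocálico actual.
--
--     - Si `grupo` está vacío, devuelve True (se puede iniciar un grupo).
--     - Si la concatenación `grupo + caracter` forma un diptongo o triptongo, devuelve True.
--     - En cualquier otro caso devuelve False.
--
--     Asume que `grupo` y `caracter` contienen vocales.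
--     """
--     # Asumimos que tanto grupo como caracter solo pueden estar formados por vocales y que caracter siempre va informado (con una vocal)
--     if grupo == "":
--         return True
--
--     if es_diptongo(grupo + caracter):
--         return True
--     if es_triptongo(grupo + caracter):
--         return True
--
--     return False
--
-- def obtener_grupos_vocalicos(palabra: str) -> list:
--     """
--     Extrae y devuelve una lista con los grupos vocálicos de `palabra`.
--
--     Cada elemento de la lista es una cadena con una secuencia válida de vocales
--     (vocal simple, diptongo o triptongo) encontrada en la palabra, en orden.
--     """
--     grupos_vocalicos = []
--     grupo = ""
--     for caracter in palabra:
--         if es_vocal(caracter):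
--             if es_grupo_vocalico_ok(grupo, caracter):
--                 grupo += caracter
--             else:
--                 grupos_vocalicos.append(grupo)
--                 grupo = caracter
--         elif grupo:
--             grupos_vocalicos.append(grupo)
--             grupo = ""
--
--     if grupo:
--         grupos_vocalicos.append(grupo)
--
--     return grupos_vocalicos
-- ===== SOURCE B (Python) =====
-- # B: run-based segmentation: split into maximal vowel runs, then emit each run's
-- # groups directly from the position of its first closed vowel (simpler, one formula per run).
-- def obtener_grupos_vocalicos(palabra: str) -> list:
--     grupos = []
--     i, n = 0, len(palabra)
--     while i < n:
--         if palabra[i] not in "aeoiu":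
--             i += 1
--             continue
--         j = i
--         while j < n and palabra[j] in "aeoiu":
--             j += 1
--         run = palabra[i:j]
--         p = next((k for k, ch in enumerate(run) if ch in "iu"), None)
--         if p is None:
--             grupos.extend(run)
--         elif p == 0:
--             grupos.append(run)
--         else:
--             grupos.extend(run[:p - 1])
--             grupos.append(run[p - 1:])
--         i = j
--     return grupos
-- ===== Notes on version B (the rewrite author's own statement) =====
-- stated objective: alternative
-- what changed: B replaces A's char-by-char state machine (growing group string re-tested with es_diptongo/es_triptongo on each char) by splitting the word into maximal vowel runs and emitting each run's groups in one step from the index of its first closed vowel (singletons before it, one merged group from the char just before it onward).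
import Mathlib
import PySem

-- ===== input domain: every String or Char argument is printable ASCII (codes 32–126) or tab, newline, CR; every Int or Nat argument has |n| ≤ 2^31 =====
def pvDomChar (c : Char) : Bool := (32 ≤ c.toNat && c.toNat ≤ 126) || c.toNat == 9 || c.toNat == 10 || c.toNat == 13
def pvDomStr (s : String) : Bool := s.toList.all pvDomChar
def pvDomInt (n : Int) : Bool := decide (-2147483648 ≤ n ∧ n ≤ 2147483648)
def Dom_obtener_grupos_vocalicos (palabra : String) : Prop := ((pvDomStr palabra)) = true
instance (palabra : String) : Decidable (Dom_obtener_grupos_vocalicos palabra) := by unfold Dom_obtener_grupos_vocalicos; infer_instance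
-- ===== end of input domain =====

-- B replaces A's char-by-char group state machine by per-run emission from the index of the
-- first closed vowel (same O(n) cost; objective: alternative decomposition). Return value only.

-- ===== PORT A =====
def pvVocalesAbiertas : List Char := ['a', 'e', 'o']

def pvVocalesCerradas : List Char := ['i', 'u']

def es_vocal (c : Char) : Bool :=
  pvVocalesAbiertas.contains c || pvVocalesCerradas.contains c

-- grupo[0]/grupo[1]: call sites always pass length ≥ 2 (grupo nonempty plus the added char)
def es_diptongo (g : List Char) : Bool :=
  match g with
  | c0 :: c1 :: _ =>
    if pvVocalesAbiertas.contains c0 && pvVocalesCerradas.contains c1 then true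
    else if pvVocalesCerradas.contains c0 && pvVocalesAbiertas.contains c1 then true
    else if pvVocalesCerradas.contains c0 && pvVocalesCerradas.contains c1 then true
    else false
  | _ => false

-- Python's `and` short-circuits, so grupo[2] is only read when the first two tests hold;
-- at every call site the first test already fails when the list has length 2, so `false`
-- for the missing third char is exact.
def es_triptongo (g : List Char) : Bool :=
  match g with
  | c0 :: c1 :: rest =>
    pvVocalesCerradas.contains c0 && pvVocalesAbiertas.contains c1 &&
      (match rest with | c2 :: _ => pvVocalesCerradas.contains c2 | [] => false)
  | _ => false

def es_grupo_vocalico_ok (g : List Char) (c : Char) : Bool :=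
  if g = [] then true
  else if es_diptongo (g ++ [c]) then true
  else if es_triptongo (g ++ [c]) then true
  else false

def pvStepA (st : List String × List Char) (c : Char) : List String × List Char :=
  let grupos := st.1
  let grupo := st.2
  if es_vocal c then
    if es_grupo_vocalico_ok grupo c then (grupos, grupo ++ [c])
    else (grupos ++ [String.ofList grupo], [c])
  else if grupo ≠ [] then (grupos ++ [String.ofList grupo], [])
  else (grupos, grupo)

def obtener_grupos_vocalicos (palabra : String) : List String :=
  let st := palabra.toList.foldl pvStepA ([], [])
  if st.2 ≠ [] then st.1 ++ [String.ofList st.2] else st.1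

-- ===== PORT B =====
def pvEsVocalB (c : Char) : Bool := (['a', 'e', 'o', 'i', 'u'] : List Char).contains c

def pvEsCerrada (c : Char) : Bool := (['i', 'u'] : List Char).contains c

def pvEmitRun (run : List Char) : List String :=
  match run.findIdx? pvEsCerrada with
  | none => run.map (fun c => String.ofList [c])
  | some 0 => [String.ofList run]
  | some p => (run.take (p - 1)).map (fun c => String.ofList [c]) ++ [String.ofList (run.drop (p - 1))]

def pvRuns : List Char → List String
  | [] => []
  | c :: cs =>
    if pvEsVocalB c then
      pvEmitRun (c :: cs.takeWhile pvEsVocalB) ++ pvRuns (cs.dropWhile pvEsVocalB)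
    else pvRuns cs
  termination_by l => l.length
  decreasing_by
  · have := List.length_dropWhile_le (p := pvEsVocalB) (l := cs); simp; omega
  · simp

def obtener_grupos_vocalicos_alt (palabra : String) : List String :=
  pvRuns palabra.toList

-- ===== PRECONDITION & SPEC =====
def Spec_obtener_grupos_vocalicos (palabra : String) (out : List String) : Prop := out = obtener_grupos_vocalicos_alt palabra
instance (palabra : String) (out : List String) : Decidable (Spec_obtener_grupos_vocalicos palabra out) := by unfold Spec_obtener_grupos_vocalicos; infer_instance

-- ===== CLAIM (what is proved, stated in full; the proofs are below) =====
def Claim_equal_obtener_grupos_vocalicos : Prop := ∀ (palabra : String), Dom_obtener_grupos_vocalicos palabra → Spec_obtener_grupos_vocalicos palabra (obtener_grupos_vocalicos palabra)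

-- ===== LEMMAS AND PROOFS =====

theorem pv_vocal_eq (c : Char) : es_vocal c = pvEsVocalB c := by
  simp [es_vocal, pvEsVocalB, pvVocalesAbiertas, pvVocalesCerradas, Bool.or_assoc]

theorem pv_vowel_cases (c : Char) (h : es_vocal c = true) :
    c = 'a' ∨ c = 'e' ∨ c = 'o' ∨ c = 'i' ∨ c = 'u' := by
  simpa [es_vocal, pvVocalesAbiertas, pvVocalesCerradas, or_assoc] using h

theorem pv_closed_cases (v : Char) (h : pvVocalesCerradas.contains v = true) :
    v = 'i' ∨ v = 'u' := by
  simpa [pvVocalesCerradas] using h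

theorem pv_not_closed (v : Char) (h : pvVocalesCerradas.contains v = false) :
    v ≠ 'i' ∧ v ≠ 'u' := by
  simpa [pvVocalesCerradas] using h

theorem es_diptongo_pair (a b : Char) (t : List Char) :
    es_diptongo (a :: b :: t) = es_diptongo [a, b] := by
  simp [es_diptongo]

theorem pv_locked (rs : List Char) : ∀ (t : List Char) (acc : List String) (a b : Char),
    es_diptongo [a, b] = true → (∀ c ∈ rs, es_vocal c = true) →
    List.foldl pvStepA (acc, a :: b :: t) rs = (acc, a :: b :: (t ++ rs)) := by
  induction rs with
  | nil => intro t acc a b _ _; simp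
  | cons c rs ih =>
    intro t acc a b hd hv
    have hvc : es_vocal c = true := hv c (List.mem_cons_self)
    have hok : es_grupo_vocalico_ok (a :: b :: t) c = true := by
      simp [es_grupo_vocalico_ok]
      exact Or.inl (by rw [es_diptongo_pair]; exact hd)
    have hstep : pvStepA (acc, a :: b :: t) c = (acc, a :: b :: (t ++ [c])) := by
      simp [pvStepA, hvc, hok]
    rw [List.foldl_cons, hstep,
      ih (t ++ [c]) acc a b hd (fun x hx => hv x (by simp [hx]))]
    simp

theorem pv_closed_start (v : Char) (rs : List Char) (acc : List String)
    (hv : pvVocalesCerradas.contains v = true) (hrs : ∀ c ∈ rs, es_vocal c = true) :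
    List.foldl pvStepA (acc, [v]) rs = (acc, v :: rs) := by
  cases rs with
  | nil => simp
  | cons c rs' =>
    have hvc : es_vocal c = true := hrs c (List.mem_cons_self)
    have hd : es_diptongo [v, c] = true := by
      rcases pv_closed_cases v hv with rfl | rfl <;>
        rcases pv_vowel_cases c hvc with rfl | rfl | rfl | rfl | rfl <;> decide
    have hok : es_grupo_vocalico_ok [v] c = true := by
      simp [es_grupo_vocalico_ok]
      exact Or.inl hd
    have hstep : pvStepA (acc, [v]) c = (acc, [v, c]) := by
      simp [pvStepA, hvc, hok]
    rw [List.foldl_cons, hstep,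
      pv_locked rs' [] acc v c hd (fun x hx => hrs x (by simp [hx]))]
    simp

theorem pvEmitRun_cons_open (v c : Char) (rs : List Char)
    (hv : pvEsCerrada v = false) (hc : pvEsCerrada c = false) :
    pvEmitRun (v :: c :: rs) = String.ofList [v] :: pvEmitRun (c :: rs) := by
  cases hfind : rs.findIdx? pvEsCerrada with
  | none =>
    simp [pvEmitRun, List.findIdx?_cons, hv, hc, hfind]
  | some k =>
    simp [pvEmitRun, List.findIdx?_cons, hv, hc, hfind]

theorem pv_open_no_merge (v c : Char)
    (hv : pvVocalesCerradas.contains v = false) (hc : pvVocalesCerradas.contains c = false) :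
    es_grupo_vocalico_ok [v] c = false := by
  obtain ⟨hv1, hv2⟩ := pv_not_closed v hv
  obtain ⟨hc1, hc2⟩ := pv_not_closed c hc
  simp [es_grupo_vocalico_ok, es_diptongo, es_triptongo,
    pvVocalesAbiertas, pvVocalesCerradas, hv1, hv2, hc1, hc2]

theorem pv_run (rs : List Char) : ∀ (v : Char) (acc : List String),
    es_vocal v = true → (∀ c ∈ rs, es_vocal c = true) →
    ∃ out g', List.foldl pvStepA (acc, [v]) rs = (acc ++ out, g') ∧ g' ≠ [] ∧
      out ++ [String.ofList g'] = pvEmitRun (v :: rs) := by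
  induction rs with
  | nil =>
    intro v acc hv _
    refine ⟨[], [v], by simp, by simp, ?_⟩
    by_cases hcv : pvVocalesCerradas.contains v = true
    · have : pvEsCerrada v = true := by simpa [pvEsCerrada, pvVocalesCerradas] using hcv
      simp [pvEmitRun, List.findIdx?_cons, this]
    · have : pvEsCerrada v = false := by
        simpa [pvEsCerrada, pvVocalesCerradas] using hcv
      simp [pvEmitRun, List.findIdx?_cons, this]
  | cons c rs' ih =>
    intro v acc hv hrs
    have hvc : es_vocal c = true := hrs c (List.mem_cons_self)
    have hrs' : ∀ x ∈ rs', es_vocal x = true := fun x hx => hrs x (by simp [hx])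
    by_cases hcv : pvVocalesCerradas.contains v = true
    · -- v closed: whole run merges into one group
      refine ⟨[], v :: c :: rs',
        by rw [pv_closed_start v (c :: rs') acc hcv hrs]; simp, by simp, ?_⟩
      have : pvEsCerrada v = true := by simpa [pvEsCerrada, pvVocalesCerradas] using hcv
      simp [pvEmitRun, List.findIdx?_cons, this]
    · have hcvF : pvVocalesCerradas.contains v = false := by simpa using hcv
      have hvF : pvEsCerrada v = false := by
        simpa [pvEsCerrada, pvVocalesCerradas] using hcv
      by_cases hcc : pvVocalesCerradas.contains c = true
      · -- open then closed: diptongo starts, rest of the run merges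
        have hd : es_diptongo [v, c] = true := by
          rcases pv_vowel_cases v hv with rfl | rfl | rfl | rfl | rfl <;>
            rcases pv_closed_cases c hcc with rfl | rfl <;> decide
        have hok : es_grupo_vocalico_ok [v] c = true := by
          simp [es_grupo_vocalico_ok]
          exact Or.inl hd
        have hstep : pvStepA (acc, [v]) c = (acc, [v, c]) := by
          simp [pvStepA, hvc, hok]
        refine ⟨[], v :: c :: rs', ?_, by simp, ?_⟩
        · rw [List.foldl_cons, hstep, pv_locked rs' [] acc v c hd hrs']; simp
        · have hcT : pvEsCerrada c = true := by simpa [pvEsCerrada, pvVocalesCerradas] using hcc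
          simp [pvEmitRun, List.findIdx?_cons, hvF, hcT]
      · -- open then open: v flushed as a singleton
        have hok : es_grupo_vocalico_ok [v] c = false :=
          pv_open_no_merge v c hcvF (by simpa using hcc)
        have hstep : pvStepA (acc, [v]) c = (acc ++ [String.ofList [v]], [c]) := by
          simp [pvStepA, hvc, hok]
        obtain ⟨out, g', hfold, hg', hout⟩ := ih c (acc ++ [String.ofList [v]]) hvc hrs'
        refine ⟨String.ofList [v] :: out, g', ?_, hg', ?_⟩
        · rw [List.foldl_cons, hstep, hfold]; simp
        · have hcF : pvEsCerrada c = false := by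
            simpa [pvEsCerrada, pvVocalesCerradas] using hcc
          rw [pvEmitRun_cons_open v c rs' hvF hcF, ← hout]
          simp

def pvFinishA (st : List String × List Char) : List String :=
  if st.2 ≠ [] then st.1 ++ [String.ofList st.2] else st.1

theorem pv_main_bounded : ∀ (n : Nat) (cs : List Char), cs.length ≤ n → ∀ (acc : List String),
    pvFinishA (List.foldl pvStepA (acc, []) cs) = acc ++ pvRuns cs := by
  intro n
  induction n with
  | zero =>
    intro cs hlen acc
    have : cs = [] := List.eq_nil_of_length_eq_zero (Nat.le_zero.mp hlen)
    subst this
    simp [pvFinishA, pvRuns]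
  | succ n ihn =>
    intro cs hlen acc
    cases cs with
    | nil => simp [pvFinishA, pvRuns]
    | cons c cs' =>
      by_cases hv : es_vocal c = true
      · have hvB : pvEsVocalB c = true := by rw [← pv_vocal_eq]; exact hv
        have hstep : pvStepA (acc, []) c = (acc, [c]) := by
          simp [pvStepA, hv, es_grupo_vocalico_ok]
        have hsplit : cs' = cs'.takeWhile pvEsVocalB ++ cs'.dropWhile pvEsVocalB :=
          (List.takeWhile_append_dropWhile).symm
        have htw : ∀ x ∈ cs'.takeWhile pvEsVocalB, es_vocal x = true := by
          intro x hx
          rw [pv_vocal_eq]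
          exact List.mem_takeWhile_imp hx
        obtain ⟨out, g', hfold, hg', hout⟩ := pv_run (cs'.takeWhile pvEsVocalB) c acc hv htw
        have hfold2 : List.foldl pvStepA (acc, []) (c :: cs') =
            List.foldl pvStepA (acc ++ out, g') (cs'.dropWhile pvEsVocalB) := by
          rw [List.foldl_cons, hstep]
          conv_lhs => rw [hsplit]
          rw [List.foldl_append, hfold]
        rw [hfold2]
        cases hdrop : cs'.dropWhile pvEsVocalB with
        | nil =>
          simp [pvFinishA, hg', pvRuns, hvB, hdrop, ← hout]
        | cons d r' =>
          have hd : pvEsVocalB d = false := by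
            have := List.head?_dropWhile_not pvEsVocalB cs'
            rw [hdrop] at this
            simpa using this
          have hdA : es_vocal d = false := by rw [pv_vocal_eq]; exact hd
          have hstepd : pvStepA (acc ++ out, g') d = (acc ++ out ++ [String.ofList g'], []) := by
            simp [pvStepA, hdA, hg']
          have hr' : r'.length ≤ n := by
            have h1 := List.length_dropWhile_le (p := pvEsVocalB) (l := cs')
            rw [hdrop] at h1
            simp at h1 hlen
            omega
          rw [List.foldl_cons, hstepd, ihn r' hr']
          simp [pvRuns, hvB, hdrop, hd, ← hout]
      · have hvF : es_vocal c = false := by simpa using hv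
        have hvB : pvEsVocalB c = false := by rw [← pv_vocal_eq]; exact hvF
        have hstep : pvStepA (acc, []) c = (acc, []) := by simp [pvStepA, hvF]
        have hcs' : cs'.length ≤ n := by simp at hlen; omega
        rw [List.foldl_cons, hstep, ihn cs' hcs']
        simp [pvRuns, hvB]

theorem pv_main (cs : List Char) (acc : List String) :
    pvFinishA (List.foldl pvStepA (acc, []) cs) = acc ++ pvRuns cs :=
  pv_main_bounded cs.length cs (Nat.le_refl _) acc

-- ===== VERDICT (by name: the statement is the Claim_ definition above) =====
theorem obtener_grupos_vocalicos_spec : Claim_equal_obtener_grupos_vocalicos := by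
  intro palabra _
  show obtener_grupos_vocalicos palabra = obtener_grupos_vocalicos_alt palabra
  have := pv_main palabra.toList []
  simpa [obtener_grupos_vocalicos, obtener_grupos_vocalicos_alt, pvFinishA] using this
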